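-- pv_equiv track=rewrite | github.com/carlosmlosa/nlp_sentences_processing | functions.py | search_matches
-- ===== SOURCE A (Python) =====
-- def search_matches(dictionary, list) -> list :
--   """Returns the list of words that has some match with some word of the list
--   of words introduced as a parameter"""
--
--   result = []
--
--   for term in list:
--     for item in dictionary:
--       for word in dictionary[item]:
--         if term.lower() == word.lower() and term.lower():# != 'anomaly' and term.lower() != 'threat':
--           result.append(item)
--
--   return result
-- ===== SOURCE B (Python) =====
-- def search_matches(dictionary, list) -> list:
--     """Index-based reimplementation: build a lowercase-word -> items map once,
--     then do a single lookup per term (A rescans the whole dictionary per term)."""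
--     index = {}
--     for item, words in dictionary.items():
--         for word in words:
--             w = word.lower()
--             if w:
--                 index.setdefault(w, []).append(item)
--     result = []
--     for term in list:
--         result += index.get(term.lower(), [])
--     return result
-- ===== Notes on version B (the rewrite author's own statement) =====
-- stated objective: faster
-- what changed: B builds a lowercase-word -> items index over the dictionary once and answers each term with one hash lookup, instead of A's rescan of every word of every dictionary entry for every term.
import Mathlib
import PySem

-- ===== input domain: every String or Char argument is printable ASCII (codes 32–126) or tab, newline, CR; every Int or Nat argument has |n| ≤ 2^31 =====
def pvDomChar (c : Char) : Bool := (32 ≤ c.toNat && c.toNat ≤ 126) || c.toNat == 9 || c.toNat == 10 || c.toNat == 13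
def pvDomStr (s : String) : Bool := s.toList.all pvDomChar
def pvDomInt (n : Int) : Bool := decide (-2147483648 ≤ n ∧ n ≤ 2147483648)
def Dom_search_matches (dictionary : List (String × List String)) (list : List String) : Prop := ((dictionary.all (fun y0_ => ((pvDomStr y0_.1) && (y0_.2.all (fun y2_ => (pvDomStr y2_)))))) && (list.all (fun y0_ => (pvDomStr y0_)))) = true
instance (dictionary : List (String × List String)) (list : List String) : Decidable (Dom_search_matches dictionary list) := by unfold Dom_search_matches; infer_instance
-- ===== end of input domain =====

-- B replaces A's per-term rescan of every dictionary word by a lowercase-word → items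
-- index built once, then one lookup per term (objective: faster).

-- ===== PORT A =====
-- 'dictionary' is a Python dict, received as its insertion-order pair list; A iterates
-- its keys and looks each key up (dictionary[item]).
def search_matches (dictionary : List (String × List String)) (list : List String) : List String :=
  let d := PySem.Dict.ofList dictionary
  list.foldl (fun result term =>
    d.keys.foldl (fun result item =>
      (d.getD item []).foldl (fun result word =>
        if (PySem.Str.lower term == PySem.Str.lower word) && (PySem.Str.lower term != "") then
          result ++ [item]
        else result) result) result) []

-- ===== PORT B =====
def search_matches_alt (dictionary : List (String × List String)) (list : List String) : List String :=
  let index := (PySem.Dict.ofList dictionary).items.foldl (fun idx p =>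
      p.2.foldl (fun idx word =>
        let w := PySem.Str.lower word
        if w != "" then idx.modify w [] (· ++ [p.1]) else idx) idx)
    PySem.Dict.empty
  list.foldl (fun result term => result ++ index.getD (PySem.Str.lower term) []) []

-- ===== PRECONDITION & SPEC =====
def Spec_search_matches (dictionary : List (String × List String)) (list : List String) (out : List String) : Prop := out = search_matches_alt dictionary list
instance (dictionary : List (String × List String)) (list : List String) (out : List String) : Decidable (Spec_search_matches dictionary list out) := by unfold Spec_search_matches; infer_instance

-- ===== CLAIM (what is proved, stated in full; the proofs are below) =====
def Claim_equal_search_matches : Prop := ∀ (dictionary : List (String × List String)) (list : List String), Dom_search_matches dictionary list → Spec_search_matches dictionary list (search_matches dictionary list)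

-- ===== LEMMAS AND PROOFS =====

-- the per-term segment both programs produce, as a pure function of the item list and term t
def pvSeg (items : List (String × List String)) (t : String) : List String :=
  items.flatMap (fun p =>
    (p.2.filter (fun w => PySem.Str.lower w == t && PySem.Str.lower w != "")).map (fun _ => p.1))

theorem pvSeg_nil (t : String) : pvSeg [] t = [] := rfl

theorem pvSeg_cons (p : String × List String) (items : List (String × List String)) (t : String) :
    pvSeg (p :: items) t =
      (p.2.filter (fun w => PySem.Str.lower w == t && PySem.Str.lower w != "")).map (fun _ => p.1)
        ++ pvSeg items t := rfl

-- B's inner word loop, lookup at t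
theorem pvBuild_inner (words : List String) (item : String)
    (d : PySem.Dict String (List String)) (t : String) :
    (words.foldl (fun idx word =>
        let w := PySem.Str.lower word
        if w != "" then idx.modify w [] (· ++ [item]) else idx) d).getD t []
      = d.getD t [] ++ (words.filter (fun w => PySem.Str.lower w == t && PySem.Str.lower w != "")).map (fun _ => item) := by
  induction words generalizing d with
  | nil => simp
  | cons w ws ih =>
    simp only [List.foldl_cons]
    rw [ih]
    by_cases hne : PySem.Str.lower w = ""
    · simp [hne]
    · by_cases ht : PySem.Str.lower w = t
      · subst ht
        simp [hne, PySem.Dict.getD_modify_self]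
      · simp [hne, ht, Ne.symm ht, PySem.Dict.getD_modify]

-- B's whole index build, lookup at t
theorem pvBuild_getD (items : List (String × List String))
    (d : PySem.Dict String (List String)) (t : String) :
    (items.foldl (fun idx p =>
        p.2.foldl (fun idx word =>
          let w := PySem.Str.lower word
          if w != "" then idx.modify w [] (· ++ [p.1]) else idx) idx) d).getD t []
      = d.getD t [] ++ pvSeg items t := by
  induction items generalizing d with
  | nil => simp [pvSeg_nil]
  | cons p ps ih =>
    simp only [List.foldl_cons]
    rw [ih, pvBuild_inner, pvSeg_cons, List.append_assoc]

-- A's innermost word loop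
theorem pvA_inner (words : List String) (item t : String) (res : List String) :
    (words.foldl (fun result word =>
        if (t == PySem.Str.lower word) && (t != "") then result ++ [item] else result) res)
      = res ++ (words.filter (fun w => PySem.Str.lower w == t && PySem.Str.lower w != "")).map (fun _ => item) := by
  induction words generalizing res with
  | nil => simp
  | cons w ws ih =>
    simp only [List.foldl_cons]
    rw [ih]
    by_cases ht : t = PySem.Str.lower w
    · by_cases hne : t = ""
      · simp [ht.symm, ← hne]
      · simp [← ht, hne]
    · simp [ht, Ne.symm ht]

-- A's dictionary loop over an item list
theorem pvA_items (items : List (String × List String)) (t : String) (res : List String) :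
    (items.foldl (fun result p =>
        p.2.foldl (fun result word =>
          if (t == PySem.Str.lower word) && (t != "") then result ++ [p.1] else result) result) res)
      = res ++ pvSeg items t := by
  induction items generalizing res with
  | nil => simp [pvSeg_nil]
  | cons p ps ih =>
    simp only [List.foldl_cons]
    rw [pvA_inner, ih, pvSeg_cons, List.append_assoc]

-- generic outer term loop: if each step appends a pure segment, the fold is a flatMap
theorem pvFoldl_seg {a : Type} (f : String → List a) (step : List a → String → List a)
    (h : ∀ res t, step res t = res ++ f t) :
    ∀ (l : List String) (res : List a), l.foldl step res = res ++ l.flatMap f := by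
  intro l
  induction l with
  | nil => simp
  | cons t ts ih => intro res; simp [h, ih, List.append_assoc]

-- ===== VERDICT (by name: the statement is the Claim_ definition above) =====
theorem search_matches_spec : Claim_equal_search_matches := by
  intro dictionary list _hdom
  show search_matches dictionary list = search_matches_alt dictionary list
  unfold search_matches search_matches_alt
  set d := PySem.Dict.ofList dictionary with hd
  have hkeys : d.keys.Nodup := PySem.Dict.nodup_keys_ofList dictionary
  have hitems : d.items = d.keys.map (fun k => (k, d.getD k [])) :=
    PySem.Dict.items_eq_map_keys d hkeys []
  -- A: each term contributes pvSeg d.items (lower term)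
  have hA : ∀ (res : List String) (t : String),
      (d.keys.foldl (fun result item =>
        (d.getD item []).foldl (fun result word =>
          if (PySem.Str.lower t == PySem.Str.lower word) && (PySem.Str.lower t != "") then
            result ++ [item]
          else result) result) res)
      = res ++ pvSeg d.items (PySem.Str.lower t) := by
    intro res t
    have h := pvA_items (d.keys.map (fun k => (k, d.getD k []))) (PySem.Str.lower t) res
    rw [List.foldl_map] at h
    rw [← hitems] at h
    exact h
  -- B: each term contributes the same segment
  have hB : ∀ (res : List String) (t : String),
      res ++ ((d.items.foldl (fun idx p =>
        p.2.foldl (fun idx word =>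
          let w := PySem.Str.lower word
          if w != "" then idx.modify w [] (· ++ [p.1]) else idx) idx)
        PySem.Dict.empty).getD (PySem.Str.lower t) [])
      = res ++ pvSeg d.items (PySem.Str.lower t) := by
    intro res t
    rw [pvBuild_getD, PySem.Dict.getD_empty]
    simp
  rw [pvFoldl_seg (fun t => pvSeg d.items (PySem.Str.lower t)) _ hA,
      pvFoldl_seg (fun t => pvSeg d.items (PySem.Str.lower t)) _ hB]
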